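-- pv_equiv track=rewrite | github.com/CurvatureX/agent_team_monorepo | apps/backend/workflow_engine_OLD/memory_implementations/conversation_summary.py | _get_recent_conversation_rounds
-- ===== SOURCE A (Python) =====
-- from typing import Any, Dict, List, Optional
--
-- def _get_recent_conversation_rounds(
--     messages: List[Dict[str, Any]], num_rounds: int = 5
-- ) -> List[Dict[str, Any]]:
--     """Get the most recent N conversation rounds (user + assistant pairs)."""
--     if not messages:
--         return []
--
--     # Find the last N user messages and their corresponding assistant responses
--     user_messages = [(i, msg) for i, msg in enumerate(messages) if msg.get("role") == "user"]
--
--     if not user_messages: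
--         return []
--
--     # Get the last num_rounds user messages
--     recent_user_msgs = (
--         user_messages[-num_rounds:] if len(user_messages) >= num_rounds else user_messages
--     )
--
--     # Collect messages from the first recent user message onwards
--     if recent_user_msgs:
--         start_index = recent_user_msgs[0][0]  # Index of first recent user message
--         return messages[start_index:]
--
--     return messages
-- ===== SOURCE B (Python) =====
-- def _get_recent_conversation_rounds(messages, num_rounds=5):
--     """Get the most recent N conversation rounds (user + assistant pairs)."""
--     start = None
--     count = 0
--     for i in range(len(messages) - 1, -1, -1):
--         if messages[i].get("role") == "user":
--             start = i
--             count += 1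
--             if count == num_rounds:
--                 break
--     if start is None:
--         return []
--     return messages[start:]
-- ===== Notes on version B (the rewrite author's own statement) =====
-- stated objective: alternative
-- what changed: B replaces A's forward build-the-full-(index,message)-list-then-slice with a single early-exit reverse scan that counts user messages and breaks once num_rounds of them have been seen, then returns the suffix from the last recorded user index; Pre_ excludes negative num_rounds (outside the task's natural domain) on conversations containing user messages, where A's slice semantics accidentally skip the first -num_rounds user rounds while B returns everything from the first user message.
import Mathlib
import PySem

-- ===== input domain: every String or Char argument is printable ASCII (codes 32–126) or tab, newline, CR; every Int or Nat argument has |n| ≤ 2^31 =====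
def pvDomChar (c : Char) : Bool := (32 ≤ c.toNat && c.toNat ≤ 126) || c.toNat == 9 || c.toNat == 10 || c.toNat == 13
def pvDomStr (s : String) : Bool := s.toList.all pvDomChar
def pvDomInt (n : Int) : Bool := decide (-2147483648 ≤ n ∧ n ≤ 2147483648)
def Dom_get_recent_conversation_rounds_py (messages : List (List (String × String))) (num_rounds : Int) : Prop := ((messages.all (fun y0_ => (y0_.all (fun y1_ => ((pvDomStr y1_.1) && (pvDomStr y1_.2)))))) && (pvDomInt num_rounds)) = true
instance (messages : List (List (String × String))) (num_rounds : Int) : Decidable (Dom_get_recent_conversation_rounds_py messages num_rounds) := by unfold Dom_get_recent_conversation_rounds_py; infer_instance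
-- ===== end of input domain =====

-- B is a different decomposition of A: one early-exit reverse scan counting user messages instead
-- of A's forward build-the-full-(index,message)-list-then-slice.

-- msg.get("role") == "user"  (dict built from the association list)
def pvIsUser (msg : List (String × String)) : Bool :=
  (PySem.Dict.ofList msg).get? "role" == some "user"

-- ===== PORT A =====
def get_recent_conversation_rounds_py (messages : List (List (String × String))) (num_rounds : Int) : List (List (String × String)) :=
  if messages = [] then []
  else
    let user_messages := (PySem.List.enumerate messages 0).filter (fun x => pvIsUser x.2)
    if user_messages = [] then []
    else
      let recent_user_msgs :=
        if (user_messages.length : Int) ≥ num_rounds then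
          PySem.List.slice user_messages (some (-num_rounds)) none
        else user_messages
      match recent_user_msgs with
      | [] => messages
      | (i, _) :: _ => PySem.List.slice messages (some i) none

-- ===== PORT B =====
-- the reverse loop of Source B: walks messages.reverse carrying the running index i, the user counter
-- and the current value of `start`; `some i` returned on `count == num_rounds` is the break
def pvLoopB : List (List (String × String)) → Int → Int → Int → Option Int → Option Int
  | [], _, _, _, start => start
  | m :: t, i, num_rounds, count, start =>
    if pvIsUser m then
      if count + 1 = num_rounds then some i
      else pvLoopB t (i - 1) num_rounds (count + 1) (some i)
    else pvLoopB t (i - 1) num_rounds count start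

def get_recent_conversation_rounds_py_alt (messages : List (List (String × String))) (num_rounds : Int) : List (List (String × String)) :=
  match pvLoopB messages.reverse ((messages.length : Int) - 1) num_rounds 0 none with
  | none => []
  | some i => PySem.List.slice messages (some i) none

-- ===== PRECONDITION & SPEC =====
-- Pre_ restricts to the task's natural domain: it excludes negative num_rounds (a nonsensical
-- request for a negative number of rounds) on conversations that contain user messages, where A's
-- value — Python slice semantics make user_messages[-num_rounds:] skip the first -num_rounds user
-- rounds — is an accident of its implementation and B's give-everything-available value is equally
-- defensible; on conversations without user messages every num_rounds is admitted (both return []).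
def Pre_get_recent_conversation_rounds_py (messages : List (List (String × String))) (num_rounds : Int) : Prop :=
  0 ≤ num_rounds ∨ messages.countP pvIsUser = 0
instance (messages : List (List (String × String))) (num_rounds : Int) : Decidable (Pre_get_recent_conversation_rounds_py messages num_rounds) := by unfold Pre_get_recent_conversation_rounds_py; infer_instance

def pvWitness_get_recent_conversation_rounds_py : (List (List (String × String))) × Int :=
  ([[("role", "user"), ("x", "a")], [("role", "assistant"), ("x", "b")], [("role", "user"), ("x", "c")]], 1)

def Spec_get_recent_conversation_rounds_py (messages : List (List (String × String))) (num_rounds : Int) (out : List (List (String × String))) : Prop := out = get_recent_conversation_rounds_py_alt messages num_rounds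
instance (messages : List (List (String × String))) (num_rounds : Int) (out : List (List (String × String))) : Decidable (Spec_get_recent_conversation_rounds_py messages num_rounds out) := by unfold Spec_get_recent_conversation_rounds_py; infer_instance

-- ===== CLAIM (what is proved, stated in full; the proofs are below) =====
def Claim_equal_get_recent_conversation_rounds_py : Prop := ∀ (messages : List (List (String × String))) (num_rounds : Int), Dom_get_recent_conversation_rounds_py messages num_rounds → Pre_get_recent_conversation_rounds_py messages num_rounds → Spec_get_recent_conversation_rounds_py messages num_rounds (get_recent_conversation_rounds_py messages num_rounds)

-- ===== LEMMAS AND PROOFS =====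

-- the enumerated-and-filtered user list has exactly countP-many entries
lemma pv_length_filter_enumerate : ∀ (msgs : List (List (String × String))) (s : Int),
    (((PySem.List.enumerate msgs s).filter (fun x => pvIsUser x.2))).length = msgs.countP pvIsUser := by
  intro msgs
  induction msgs with
  | nil => intro s; simp [PySem.List.enumerate_nil]
  | cons m t ih =>
    intro s
    rw [PySem.List.enumerate_cons]
    by_cases h : pvIsUser m <;> simp [h, ih (s + 1)]

-- characterisation of B's reverse loop in terms of A's filtered enumeration:
-- break (some index of the (nr-c)-th user from the end), or the first user index, or the accumulator
lemma pv_loopB_spec : ∀ (msgs : List (List (String × String))) (nr c : Int) (s0 : Option Int),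
    pvLoopB msgs.reverse ((msgs.length : Int) - 1) nr c s0 =
      (let um := (PySem.List.enumerate msgs 0).filter (fun x => pvIsUser x.2)
       if 1 ≤ nr - c ∧ nr - c ≤ (um.length : Int) then
         ((um.drop (um.length - (nr - c).toNat)).head?).map Prod.fst
       else if um = [] then s0 else (um.head?).map Prod.fst) := by
  intro msgs
  induction msgs using List.reverseRecOn with
  | nil => intro nr c s0; simp [pvLoopB, PySem.List.enumerate_nil]; omega
  | append_singleton ms m ih =>
    intro nr c s0
    have hrev : (ms ++ [m]).reverse = m :: ms.reverse := by simp
    have hlen : (((ms ++ [m]).length : Int) - 1) = (ms.length : Int) := by simp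
    have henum : (PySem.List.enumerate (ms ++ [m]) 0).filter (fun x => pvIsUser x.2)
        = ((PySem.List.enumerate ms 0).filter (fun x => pvIsUser x.2))
          ++ (PySem.List.enumerate [m] ((ms.length : Int))).filter (fun x => pvIsUser x.2) := by
      rw [PySem.List.enumerate_append, List.filter_append]; norm_num
    rw [hrev, hlen]
    set um := (PySem.List.enumerate ms 0).filter (fun x => pvIsUser x.2) with humdef
    set W : Nat := um.length with hW
    by_cases h : pvIsUser m
    · have hum1 : (PySem.List.enumerate (ms ++ [m]) 0).filter (fun x => pvIsUser x.2)
          = um ++ [((ms.length : Int), m)] := by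
        rw [henum, PySem.List.enumerate_cons, PySem.List.enumerate_nil]
        simp [h]
      by_cases hbr : c + 1 = nr
      · -- break at this element
        have hl : pvLoopB (m :: ms.reverse) ((ms.length : Int)) nr c s0 = some ((ms.length : Int)) := by
          simp [pvLoopB, h, hbr]
        rw [hl]
        simp only [hum1]
        have hc : 1 ≤ nr - c ∧ nr - c ≤ ((um ++ [((ms.length : Int), m)]).length : Int) := by
          simp; omega
        rw [if_pos hc]
        have ht : (nr - c).toNat = 1 := by omega
        have hd : (um ++ [((ms.length : Int), m)]).length - (nr - c).toNat = W := by
          simp [ht, hW]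
        rw [hd]
        rw [List.drop_left' (by rw [hW])]
        rfl
      · have hl : pvLoopB (m :: ms.reverse) ((ms.length : Int)) nr c s0
            = pvLoopB ms.reverse ((ms.length : Int) - 1) nr (c + 1) (some ((ms.length : Int))) := by
          simp [pvLoopB, h, hbr]
        rw [hl, ih nr (c + 1) (some ((ms.length : Int)))]
        simp only [hum1, ← humdef, ← hW]
        by_cases hcond : 1 ≤ nr - (c + 1) ∧ nr - (c + 1) ≤ (W : Int)
        · rw [if_pos hcond]
          have hcond' : 1 ≤ nr - c ∧ nr - c ≤ ((um ++ [((ms.length : Int), m)]).length : Int) := by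
            simp; omega
          rw [if_pos hcond']
          have hdlt : W - (nr - (c + 1)).toNat < W := by omega
          have hdeq : (um ++ [((ms.length : Int), m)]).length - (nr - c).toNat
              = W - (nr - (c + 1)).toNat := by simp [← hW]; omega
          rw [hdeq]
          rw [List.drop_append_of_le_length (by omega)]
          have hne : um.drop (W - (nr - (c + 1)).toNat) ≠ [] := by
            intro hnil
            have := List.drop_eq_nil_iff.mp hnil
            omega
          rcases hh : um.drop (W - (nr - (c + 1)).toNat) with _ | ⟨p, r⟩
          · exact absurd hh hne
          · simp [hh]
        · rw [if_neg hcond]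
          have hcond' : ¬(1 ≤ nr - c ∧ nr - c ≤ ((um ++ [((ms.length : Int), m)]).length : Int)) := by
            simp only [List.length_append, List.length_cons, List.length_nil]
            push_neg
            intro h1
            have : nr - c ≠ 1 := by omega
            push_neg at hcond
            have h2 := hcond (by omega)
            push_cast
            omega
          rw [if_neg hcond']
          have hne2 : um ++ [((ms.length : Int), m)] ≠ [] := by simp
          rw [if_neg hne2]
          by_cases hu : um = []
          · simp [hu]
          · rw [if_neg hu]
            rcases um with _ | ⟨p, r⟩
            · exact absurd rfl hu
            · simp
    · have hum1 : (PySem.List.enumerate (ms ++ [m]) 0).filter (fun x => pvIsUser x.2) = um := by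
        rw [henum, PySem.List.enumerate_cons, PySem.List.enumerate_nil]
        simp [h]
      have hl : pvLoopB (m :: ms.reverse) ((ms.length : Int)) nr c s0
          = pvLoopB ms.reverse ((ms.length : Int) - 1) nr c s0 := by
        simp [pvLoopB, h]
      rw [hl, ih nr c s0]
      simp only [hum1, ← humdef]

-- ===== VERDICT (by name: the statement is the Claim_ definition above) =====
theorem get_recent_conversation_rounds_py_spec : Claim_equal_get_recent_conversation_rounds_py := by
  intro messages num_rounds _ hPre
  unfold Spec_get_recent_conversation_rounds_py
  unfold get_recent_conversation_rounds_py get_recent_conversation_rounds_py_alt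
  rw [pv_loopB_spec messages num_rounds 0 none]
  by_cases hm : messages = []
  · simp [hm, PySem.List.enumerate_nil]
  simp only [hm, if_false, sub_zero]
  set um := (PySem.List.enumerate messages 0).filter (fun x => pvIsUser x.2) with humdef
  have hcount : um.length = messages.countP pvIsUser := pv_length_filter_enumerate messages 0
  by_cases h0 : um = []
  · simp [h0]
  have hWpos : 0 < um.length := List.length_pos_of_ne_nil h0
  rw [if_neg h0]
  obtain ⟨⟨j0, v0⟩, rest, hum⟩ := List.exists_cons_of_ne_nil h0
  have hnr : 0 ≤ num_rounds := by
    rcases hPre with h | h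
    · exact h
    · omega
  by_cases h1 : 1 ≤ num_rounds ∧ num_rounds ≤ (um.length : Int)
  · -- break case: both take the suffix at the num_rounds-th user message from the end
    rw [if_pos h1]
    have hge : (um.length : Int) ≥ num_rounds := h1.2
    rw [if_pos hge]
    rw [show (-num_rounds) = -((num_rounds.toNat : Nat) : Int) by omega]
    rw [PySem.List.slice_from_neg_natCast um num_rounds.toNat (by omega)]
    have hne : um.drop (um.length - num_rounds.toNat) ≠ [] := by
      intro hnil; have := List.drop_eq_nil_iff.mp hnil; omega
    obtain ⟨⟨j1, v1⟩, r1, hd⟩ := List.exists_cons_of_ne_nil hne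
    rw [hd]
    rfl
  · rw [if_neg h1, if_neg h0]
    have hh : um.head? = some (j0, v0) := by rw [hum]; rfl
    rw [hh]
    by_cases hge : (um.length : Int) ≥ num_rounds
    · -- num_rounds = 0: the slice keeps the whole user list
      have hz : num_rounds = 0 := by omega
      subst hz
      rw [if_pos hge]
      rw [show (-(0 : Int)) = (0 : Int) by ring]
      rw [PySem.List.slice_from um (by omega)]
      simp only [Int.toNat_zero, List.drop_zero]
      rw [hum]
      rfl
    · -- num_rounds > number of user messages: A keeps the whole user list
      rw [if_neg hge, hum]
      rfl
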